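-- pv_equiv track=rewrite | github.com/seyoung755/AlgorithmTest | self study/Programmers/호텔 방 배정.py | solution
-- ===== SOURCE A (Python) =====
-- def solution(k, room_number):
--     answer = []
--
--     rooms = {}
--
--     for num in room_number:
--
--         if rooms.get(num) is None:
--             rooms[num] = num+1
--
--         # 방 번호 충돌 발생 시
--         else:
--
--             start = num # 충돌이 발생한 첫 방 번호 저장
--             next_num = rooms[num] # 가리키는 다음 방으로 이동
--             while rooms.get(next_num) is not None: # 충돌이 일어나는 방들이 가리킨 다음 방이 빌 때까지 반복
--                 temp = next_num
--                 next_num = rooms[next_num] # 충돌이 일어났으므로 다음 방을 탐색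
--                 rooms[temp] = start # 탐색한 모든 방을 첫 방을 가리키게 만듦
--
--             rooms[next_num] = start
--             rooms[start] = next_num + 1 # 첫 방은 손님이 들어간 다음 방을 가리키게 됨
--             num = next_num
--
--         answer.append(num)
--
--
--
--     return answer
-- ===== SOURCE B (Python) =====
-- def solution(k, room_number):
--     # Simpler re-implementation: linear probing over a set of occupied rooms
--     # (no pointer-forwarding dict); same assignments as A.
--     occupied = set()
--     answer = []
--     for num in room_number:
--         room = num
--         while room in occupied:
--             room += 1
--         occupied.add(room)
--         answer.append(room)
--     return answer
-- ===== Notes on version B (the rewrite author's own statement) =====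
-- stated objective: simpler
-- what changed: A maintains a dict of forwarding pointers with path compression to skip occupied rooms; B drops the pointer structure entirely and linearly probes upward from the requested room over a plain set of occupied rooms.
import Mathlib
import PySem

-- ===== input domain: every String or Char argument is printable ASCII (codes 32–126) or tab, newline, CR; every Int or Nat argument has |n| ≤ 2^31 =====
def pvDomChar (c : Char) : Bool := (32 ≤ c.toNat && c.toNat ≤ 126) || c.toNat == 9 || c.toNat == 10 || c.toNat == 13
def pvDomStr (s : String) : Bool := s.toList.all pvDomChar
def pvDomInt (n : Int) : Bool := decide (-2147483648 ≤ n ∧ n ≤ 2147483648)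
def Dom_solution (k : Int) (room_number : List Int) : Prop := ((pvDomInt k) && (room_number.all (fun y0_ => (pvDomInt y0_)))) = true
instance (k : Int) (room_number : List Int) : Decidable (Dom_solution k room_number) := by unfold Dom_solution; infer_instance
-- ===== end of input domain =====

-- B replaces A's forwarding-pointer dict (path compression) by plain linear probing
-- over a set of occupied rooms: simpler, same assignments.

-- ===== PORT A =====
-- A's inner while loop (temp = next_num; next_num = rooms[next_num]; rooms[temp] = start),
-- with fuel as a termination device only (proved sufficient below).
def solWhileA (rooms : PySem.Dict Int Int) (start : Int) (next_num : Int) :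
    Nat → PySem.Dict Int Int × Int
  | 0 => (rooms, next_num)
  | fuel + 1 =>
    match rooms.get? next_num with
    | some v => solWhileA (rooms.insert next_num start) start v fuel
    | none => (rooms, next_num)

-- one iteration of A's for loop
def solStepA (rooms : PySem.Dict Int Int) (num : Int) : PySem.Dict Int Int × Int :=
  match rooms.get? num with
  | none => (rooms.insert num (num + 1), num)
  | some nxt =>
    let r := solWhileA rooms num nxt (rooms.size + 1)
    (((r.1).insert r.2 num).insert num (r.2 + 1), r.2)

def solution (k : Int) (room_number : List Int) : List Int :=
  (room_number.foldl
    (fun st num =>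
      let r := solStepA st.1 num
      (r.1, st.2 ++ [r.2]))
    ((PySem.Dict.empty : PySem.Dict Int Int), ([] : List Int))).2

-- ===== PORT B =====
-- B's inner while loop (while room in occupied: room += 1), fuel is a termination
-- device only (proved sufficient below).
def solProbe (occupied : PySem.Set Int) (room : Int) : Nat → Int
  | 0 => room
  | fuel + 1 =>
    if PySem.Set.contains occupied room then solProbe occupied (room + 1) fuel else room

def solution_alt (k : Int) (room_number : List Int) : List Int :=
  (room_number.foldl
    (fun st num =>
      let r := solProbe st.1 num (st.1.length + 1)
      (PySem.Set.add st.1 r, st.2 ++ [r]))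
    ((PySem.Set.empty : PySem.Set Int), ([] : List Int))).2

-- ===== PRECONDITION & SPEC =====
def Spec_solution (k : Int) (room_number : List Int) (out : List Int) : Prop := out = solution_alt k room_number
instance (k : Int) (room_number : List Int) (out : List Int) : Decidable (Spec_solution k room_number out) := by unfold Spec_solution; infer_instance

-- ===== CLAIM (what is proved, stated in full; the proofs are below) =====
def Claim_equal_solution : Prop := ∀ (k : Int) (room_number : List Int), Dom_solution k room_number → Spec_solution k room_number (solution k room_number)

-- ===== LEMMAS AND PROOFS =====

-- `pvFF S x` = the smallest room ≥ x that is not in S (the room both programs assign).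
lemma pv_escape (S : List Int) (x : Int) :
    ∃ n : Nat, ∀ m : Nat, n ≤ m → x + (m : Int) ∉ S := by
  induction S with
  | nil => exact ⟨0, by simp⟩
  | cons a S ih =>
    obtain ⟨n, hn⟩ := ih
    refine ⟨max n ((a - x).toNat + 1), fun m hm => ?_⟩
    have h1 : n ≤ m := le_trans (le_max_left _ _) hm
    have h2 : (a - x).toNat + 1 ≤ m := le_trans (le_max_right _ _) hm
    simp only [List.mem_cons, not_or]
    exact ⟨by omega, hn m h1⟩

lemma pv_exists_free (S : List Int) (x : Int) : ∃ n : Nat, x + (n : Int) ∉ S := by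
  obtain ⟨n, hn⟩ := pv_escape S x
  exact ⟨n, hn n le_rfl⟩

def pvFF (S : List Int) (x : Int) : Int := x + (Nat.find (pv_exists_free S x) : Int)

lemma pvFF_not_mem (S : List Int) (x : Int) : pvFF S x ∉ S := Nat.find_spec (pv_exists_free S x)

lemma pvFF_le (S : List Int) (x : Int) : x ≤ pvFF S x := by
  unfold pvFF; omega

lemma pvFF_mem_of_lt (S : List Int) (x y : Int) (h1 : x ≤ y) (h2 : y < pvFF S x) : y ∈ S := by
  have hm : (y - x).toNat < Nat.find (pv_exists_free S x) := by unfold pvFF at h2; omega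
  have := Nat.find_min (pv_exists_free S x) hm
  simp only [not_not] at this
  have hxy : x + ((y - x).toNat : Int) = y := by omega
  rwa [hxy] at this

lemma pvFF_eq_iff (S : List Int) (x v : Int) :
    pvFF S x = v ↔ x ≤ v ∧ v ∉ S ∧ ∀ y, x ≤ y → y < v → y ∈ S := by
  constructor
  · rintro rfl
    exact ⟨pvFF_le S x, pvFF_not_mem S x, fun y hy hy' => pvFF_mem_of_lt S x y hy hy'⟩
  · rintro ⟨h1, h2, h3⟩
    by_contra hne
    rcases lt_or_gt_of_ne hne with hlt | hgt
    · exact (pvFF_not_mem S x) (h3 _ (pvFF_le S x) hlt)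
    · exact h2 (pvFF_mem_of_lt S x v h1 hgt)

lemma pvFF_of_not_mem (S : List Int) (x : Int) (h : x ∉ S) : pvFF S x = x :=
  (pvFF_eq_iff S x x).mpr ⟨le_rfl, h, fun y hy hy' => absurd (lt_of_le_of_lt hy hy') (lt_irrefl x)⟩

lemma pvFF_of_mem (S : List Int) (x : Int) (h : x ∈ S) : pvFF S x = pvFF S (x + 1) := by
  refine (pvFF_eq_iff S x _).mpr ⟨?_, pvFF_not_mem S (x + 1), ?_⟩
  · have := pvFF_le S (x + 1); omega
  · intro y hy hy'
    by_cases hyx : y = x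
    · exact hyx ▸ h
    · exact pvFF_mem_of_lt S (x + 1) y (by omega) hy'

lemma pvFF_add (S S' : List Int) (m : Int) (hm : ∀ y, y ∈ S' ↔ y ∈ S ∨ y = m) (x : Int) :
    pvFF S' x = if pvFF S x = m then pvFF S (m + 1) else pvFF S x := by
  split_ifs with hx
  · refine (pvFF_eq_iff S' x _).mpr ⟨?_, ?_, ?_⟩
    · have h1 := pvFF_le S x; have h2 := pvFF_le S (m + 1); omega
    · intro hmem
      rcases (hm _).mp hmem with h | h
      · exact pvFF_not_mem S (m + 1) h
      · have := pvFF_le S (m + 1); omega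
    · intro y hy hy'
      rcases lt_trichotomy y m with h | h | h
      · exact (hm y).mpr (Or.inl (pvFF_mem_of_lt S x y hy (by omega)))
      · exact (hm y).mpr (Or.inr h)
      · exact (hm y).mpr (Or.inl (pvFF_mem_of_lt S (m + 1) y (by omega) hy'))
  · refine (pvFF_eq_iff S' x _).mpr ⟨pvFF_le S x, ?_, ?_⟩
    · intro hmem
      rcases (hm _).mp hmem with h | h
      · exact pvFF_not_mem S x h
      · exact hx h
    · intro y hy hy'
      exact (hm y).mpr (Or.inl (pvFF_mem_of_lt S x y hy hy'))

-- the probed range [x, pvFF S x) sits inside S, so its length is ≤ S.length when S has no duplicates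
lemma pvFF_sub_le (S : List Int) (hS : S.Nodup) (x : Int) :
    (pvFF S x - x).toNat ≤ S.length := by
  set n := (pvFF S x - x).toNat with hn
  have hsub : ((List.range n).map (fun i : Nat => x + (i : Int))) ⊆ S := by
    intro y hy
    simp only [List.mem_map, List.mem_range] at hy
    obtain ⟨i, hi, rfl⟩ := hy
    exact pvFF_mem_of_lt S x _ (by omega) (by omega)
  have hnd : ((List.range n).map (fun i : Nat => x + (i : Int))).Nodup := by
    refine List.Nodup.map_on ?_ (List.nodup_range)
    intro a _ b _ hab; omega
  have := (hnd.subperm hsub).length_le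
  simpa using this

lemma solProbe_eq (S : PySem.Set Int) (x : Int) :
    ∀ fuel : Nat, (pvFF S x - x).toNat < fuel → solProbe S x fuel = pvFF S x := by
  have hgen : ∀ (fuel : Nat) (y : Int), (pvFF S y - y).toNat < fuel → solProbe S y fuel = pvFF S y := by
    intro fuel
    induction fuel with
    | zero => intro y h; omega
    | succ f ih =>
      intro y h
      by_cases hy : y ∈ S
      · have hc : PySem.Set.contains S y = true := (PySem.Set.contains_iff S y).mpr hy
        have hstep := pvFF_of_mem S y hy
        have hle := pvFF_le S (y + 1)
        simp only [solProbe, hc, if_true]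
        rw [ih (y + 1) (by omega), ← hstep]
      · have hc : PySem.Set.contains S y = false := by
          by_contra hcc
          exact hy ((PySem.Set.contains_iff S y).mp (by simpa using hcc))
        simp only [solProbe, hc, if_false]
        exact (pvFF_of_not_mem S y hy).symm
  intro fuel h
  exact hgen fuel x h

-- ===== A-side machinery: the pointer chain =====

def pvStep (d : PySem.Dict Int Int) (s : Int) : Int :=
  match d.get? s with
  | some v => v
  | none => s

-- the invariant A's dict maintains, relative to the set S of occupied rooms:
-- keys = S; every pointer preserves the first-free room; every chain terminates.
def pvInv (d : PySem.Dict Int Int) (S : List Int) : Prop :=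
  (∀ x, (d.get? x).isSome ↔ x ∈ S) ∧
  (∀ x v, d.get? x = some v → pvFF S v = pvFF S x) ∧
  (∀ x, ∃ n, d.get? ((pvStep d)^[n] x) = none)

lemma pv_chain_ff (d : PySem.Dict Int Int) (S : List Int)
    (hedge : ∀ x v, d.get? x = some v → pvFF S v = pvFF S x) :
    ∀ (n : Nat) (x : Int), pvFF S ((pvStep d)^[n] x) = pvFF S x := by
  intro n
  induction n with
  | zero => intro x; rfl
  | succ n ih =>
    intro x
    rw [Function.iterate_succ_apply']
    set z := (pvStep d)^[n] x with hz
    cases hv : d.get? z with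
    | none => simp only [pvStep, hv]; exact ih x
    | some v => simp only [pvStep, hv]; rw [hedge z v hv]; exact ih x

lemma pv_chain_eq (d d2 : PySem.Dict Int Int) (S : List Int) (F : Int)
    (hedge : ∀ x v, d.get? x = some v → pvFF S v = pvFF S x)
    (hchg : ∀ z, d2.get? z ≠ d.get? z → pvFF S z = F) :
    ∀ (n : Nat) (x : Int), pvFF S x ≠ F → (pvStep d2)^[n] x = (pvStep d)^[n] x := by
  intro n
  induction n with
  | zero => intro x _; rfl
  | succ n ih =>
    intro x hx
    rw [Function.iterate_succ_apply', Function.iterate_succ_apply', ih x hx]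
    set z := (pvStep d)^[n] x with hz
    have hffz : pvFF S z = pvFF S x := pv_chain_ff d S hedge n x
    have : d2.get? z = d.get? z := by
      by_contra hne
      exact hx (hffz ▸ hchg z hne)
    simp only [pvStep, this]

lemma pv_term2_of_ff_ne (d d2 : PySem.Dict Int Int) (S : List Int) (F : Int)
    (hedge : ∀ x v, d.get? x = some v → pvFF S v = pvFF S x)
    (hchg : ∀ z, d2.get? z ≠ d.get? z → pvFF S z = F)
    (hterm : ∀ y, ∃ n, d.get? ((pvStep d)^[n] y) = none)
    (y : Int) (hy : pvFF S y ≠ F) :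
    ∃ n, d2.get? ((pvStep d2)^[n] y) = none := by
  obtain ⟨n, hn⟩ := hterm y
  refine ⟨n, ?_⟩
  rw [pv_chain_eq d d2 S F hedge hchg n y hy]
  set t := (pvStep d)^[n] y with ht
  have hfft : pvFF S t = pvFF S y := pv_chain_ff d S hedge n y
  have : d2.get? t = d.get? t := by
    by_contra hne
    exact hy (hfft ▸ hchg t hne)
  rw [this, hn]

lemma pv_term_preserve (d d2 : PySem.Dict Int Int) (S : List Int) (F : Int)
    (hedge : ∀ x v, d.get? x = some v → pvFF S v = pvFF S x)
    (hchg : ∀ z, d2.get? z ≠ d.get? z → pvFF S z = F)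
    (hterm : ∀ y, ∃ n, d.get? ((pvStep d)^[n] y) = none)
    (hjump : ∀ z, d2.get? z ≠ d.get? z → ∃ (m : Nat) (y' : Int),
        (pvStep d2)^[m] z = y' ∧ pvFF S y' ≠ F) :
    ∀ y, ∃ n, d2.get? ((pvStep d2)^[n] y) = none := by
  have main : ∀ (n : Nat) (y : Int), d.get? ((pvStep d)^[n] y) = none →
      ∃ m, d2.get? ((pvStep d2)^[m] y) = none := by
    intro n
    induction n using Nat.strong_induction_on with
    | _ n ih =>
      intro y hy
      by_cases heq : d2.get? y = d.get? y
      · cases hv : d.get? y with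
        | none => exact ⟨0, by simpa [heq] using hv⟩
        | some v =>
          cases n with
          | zero => simp only [Function.iterate_zero, id] at hy; rw [hy] at hv; exact absurd hv (by simp)
          | succ n' =>
            rw [Function.iterate_succ_apply] at hy
            have hstep : pvStep d y = v := by simp [pvStep, hv]
            rw [hstep] at hy
            obtain ⟨m, hm⟩ := ih n' (Nat.lt_succ_self n') v hy
            refine ⟨m + 1, ?_⟩
            rw [Function.iterate_succ_apply]
            have : pvStep d2 y = v := by simp [pvStep, heq, hv]
            rwa [this]
      · obtain ⟨m, y', hiter, hff⟩ := hjump y heq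
        obtain ⟨n2, hn2⟩ := pv_term2_of_ff_ne d d2 S F hedge hchg hterm y' hff
        refine ⟨n2 + m, ?_⟩
        rw [Function.iterate_add_apply, hiter]
        exact hn2
  intro y
  obtain ⟨n, hn⟩ := hterm y
  exact main n y hn

-- simulation of A's while loop along the chain c 0, c 1, …, c N
lemma pv_whileA_sim (d : PySem.Dict Int Int) (c : Nat → Int) (N : Nat)
    (hstep : ∀ i, i < N → d.get? (c i) = some (c (i + 1)))
    (hnone : d.get? (c N) = none)
    (hinj : ∀ i j, i < j → j ≤ N → c i ≠ c j) :
    ∀ (k i : Nat) (d' : PySem.Dict Int Int) (fuel : Nat),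
      i + k = N →
      (∀ j, i ≤ j → j ≤ N → d'.get? (c j) = d.get? (c j)) →
      k ≤ fuel →
      (solWhileA d' (c 0) (c i) fuel).2 = c N ∧
      (∀ j, i ≤ j → j < N → (solWhileA d' (c 0) (c i) fuel).1.get? (c j) = some (c 0)) ∧
      (∀ y, (∀ j, i ≤ j → j < N → y ≠ c j) →
        (solWhileA d' (c 0) (c i) fuel).1.get? y = d'.get? y) := by
  intro k
  induction k with
  | zero =>
    intro i d' fuel hik hagree _
    have hiN : i = N := by omega
    subst hiN
    have hget : d'.get? (c i) = none := by rw [hagree i le_rfl le_rfl, hnone]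
    have hres : solWhileA d' (c 0) (c i) fuel = (d', c i) := by
      cases fuel with
      | zero => rfl
      | succ f => simp [solWhileA, hget]
    rw [hres]
    exact ⟨rfl, fun j hj hj' => absurd (lt_of_le_of_lt hj hj') (lt_irrefl i), fun y _ => rfl⟩
  | succ k ih =>
    intro i d' fuel hik hagree hfuel
    have hiN : i < N := by omega
    cases fuel with
    | zero => omega
    | succ f =>
      have hget : d'.get? (c i) = some (c (i + 1)) := by
        rw [hagree i le_rfl (by omega), hstep i hiN]
      have hred : solWhileA d' (c 0) (c i) (f + 1)
          = solWhileA (d'.insert (c i) (c 0)) (c 0) (c (i + 1)) f := by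
        simp [solWhileA, hget]
      have hagree' : ∀ j, i + 1 ≤ j → j ≤ N →
          (d'.insert (c i) (c 0)).get? (c j) = d.get? (c j) := by
        intro j hj hj'
        rw [PySem.Dict.get?_insert_of_ne _ _ (hinj i j (by omega) hj').symm, hagree j (by omega) hj']
      obtain ⟨h1, h2, h3⟩ := ih (i + 1) (d'.insert (c i) (c 0)) f (by omega) hagree' (by omega)
      rw [hred]
      refine ⟨h1, ?_, ?_⟩
      · intro j hj hj'
        by_cases hji : j = i
        · subst hji
          rw [h3 (c j) (fun j' hj' hj'' => (hinj j j' (by omega) (by omega))),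
            PySem.Dict.get?_insert_self]
        · exact h2 j (by omega) hj'
      · intro y hy
        rw [h3 y (fun j hj hj' => hy j (by omega) hj'),
          PySem.Dict.get?_insert_of_ne _ _ (hy i le_rfl hiN)]

lemma pv_whileA_keys : ∀ (fuel : Nat) (d : PySem.Dict Int Int) (s x : Int),
    d.keys.Nodup → (solWhileA d s x fuel).1.keys.Nodup := by
  intro fuel
  induction fuel with
  | zero => intro d s x h; exact h
  | succ f ih =>
    intro d s x h
    cases hv : d.get? x with
    | none => simpa [solWhileA, hv] using h
    | some v =>
      simp only [solWhileA, hv]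
      exact ih _ s v (PySem.Dict.nodup_keys_insert _ _ _ h)

lemma pv_mem_keys_iff (d : PySem.Dict Int Int) (y : Int) :
    y ∈ d.keys ↔ (d.get? y).isSome := by
  rw [Option.isSome_iff_ne_none]
  constructor
  · intro h hn; exact ((PySem.Dict.get?_eq_none_iff_not_mem_keys d y).mp hn) h
  · intro h; by_contra hm; exact h ((PySem.Dict.get?_eq_none_iff_not_mem_keys d y).mpr hm)

def pvChain (d : PySem.Dict Int Int) (num : Int) (i : Nat) : Int := (pvStep d)^[i] num

lemma pvChain_succ (d : PySem.Dict Int Int) (num : Int) (i : Nat) :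
    pvChain d num (i + 1) = pvStep d (pvChain d num i) := Function.iterate_succ_apply' _ _ _

lemma pvChain_add (d : PySem.Dict Int Int) (num : Int) (t i : Nat) :
    pvChain d num (t + i) = (pvStep d)^[t] (pvChain d num i) := Function.iterate_add_apply _ _ _ _

-- the key step lemma: one iteration of A assigns pvFF S num and preserves the invariant
lemma pv_stepA_spec (d : PySem.Dict Int Int) (S : List Int) (num : Int)
    (hInv : pvInv d S) (hS : S.Nodup) (hKn : d.keys.Nodup) :
    (solStepA d num).2 = pvFF S num ∧
    pvInv (solStepA d num).1 (PySem.Set.add S (pvFF S num)) ∧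
    (PySem.Set.add S (pvFF S num)).Nodup ∧
    (solStepA d num).1.keys.Nodup := by
  obtain ⟨hK, hE, hT⟩ := hInv
  have hmem' : ∀ y, y ∈ PySem.Set.add S (pvFF S num) ↔ y ∈ S ∨ y = pvFF S num :=
    fun y => PySem.Set.mem_add S (pvFF S num) y
  have ffadd := pvFF_add S (PySem.Set.add S (pvFF S num)) (pvFF S num) hmem'
  cases hv : d.get? num with
  | none =>
    have hnumS : num ∉ S := by
      intro h; have := (hK num).mpr h; rw [hv] at this; simp at this
    have hF : pvFF S num = num := pvFF_of_not_mem S num hnumS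
    have hstepA : solStepA d num = (d.insert num (num + 1), num) := by
      simp [solStepA, hv]
    have hget2 : ∀ y, (d.insert num (num + 1)).get? y
        = if y = num then some (num + 1) else d.get? y := by
      intro y; rw [PySem.Dict.get?_insert]
    have hG : num + 1 ≤ pvFF S (num + 1) := pvFF_le S (num + 1)
    rw [hF] at hmem' ffadd
    rw [hstepA, hF]
    refine ⟨rfl, ⟨?_, ?_, ?_⟩, PySem.Set.nodup_add S _ hS,
      PySem.Dict.nodup_keys_insert _ _ _ hKn⟩
    · intro y
      rw [hget2 y]
      split_ifs with h
      · simp only [Option.isSome_some, true_iff]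
        exact (hmem' y).mpr (Or.inr h)
      · rw [hK y]
        constructor
        · intro hy; exact (hmem' y).mpr (Or.inl hy)
        · intro hy
          rcases (hmem' y).mp hy with hy' | hy'
          · exact hy'
          · exact absurd hy' h
    · intro x w hx
      rw [hget2 x] at hx
      split_ifs at hx with h
      · obtain rfl : w = num + 1 := by injection hx with h'; omega
        subst h
        rw [ffadd, ffadd, if_neg (by omega), if_pos hF]
      · have := hE x w hx
        rw [ffadd, ffadd, this]
    · refine pv_term_preserve d _ S num hE ?_ hT ?_
      · intro z hz
        rw [hget2 z] at hz
        split_ifs at hz with h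
        · rw [h]; exact hF
        · exact absurd rfl hz
      · intro z hz
        rw [hget2 z] at hz
        split_ifs at hz with h
        · subst h
          refine ⟨1, z + 1, ?_, by omega⟩
          have : (d.insert z (z + 1)).get? z = some (z + 1) :=
            PySem.Dict.get?_insert_self d z (z + 1)
          simp [pvStep, this]
        · exact absurd rfl hz
  | some v0 =>
    have hnumS : num ∈ S := (hK num).mp (by rw [hv]; simp)
    have hFS : pvFF S num ∉ S := pvFF_not_mem S num
    have hFnum : pvFF S num ≠ num := by
      intro h; exact hFS (by rw [h]; exact hnumS)
    have hTn := hT num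
    set N := Nat.find hTn with hNdef
    have hNnone : d.get? (pvChain d num N) = none := Nat.find_spec hTn
    have hNmin : ∀ i, i < N → d.get? (pvChain d num i) ≠ none :=
      fun i hi => Nat.find_min hTn hi
    have hsome : ∀ i, i < N → d.get? (pvChain d num i) = some (pvChain d num (i + 1)) := by
      intro i hi
      cases hvi : d.get? (pvChain d num i) with
      | none => exact absurd hvi (hNmin i hi)
      | some w =>
        have hci : pvChain d num (i + 1) = w := by
          rw [pvChain_succ]; simp [pvStep, hvi]
        rw [hci]
    have hNpos : 0 < N := by
      rcases Nat.eq_zero_or_pos N with h0 | h0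
      · rw [h0] at hNnone
        rw [show pvChain d num 0 = num from rfl, hv] at hNnone
        exact absurd hNnone (by simp)
      · exact h0
    have hffc : ∀ i, pvFF S (pvChain d num i) = pvFF S num :=
      fun i => pv_chain_ff d S hE i num
    have hmemc : ∀ i, i < N → pvChain d num i ∈ S := by
      intro i hi
      exact (hK _).mp (by rw [hsome i hi]; simp)
    have hcNS : pvChain d num N ∉ S := by
      intro h
      have := (hK _).mpr h
      rw [hNnone] at this; simp at this
    have hcNF : pvChain d num N = pvFF S num := by
      have h1 := hffc N
      have h2 := pvFF_of_not_mem S (pvChain d num N) hcNS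
      omega
    have hinj : ∀ i j, i < j → j ≤ N → pvChain d num i ≠ pvChain d num j := by
      intro i j hij hjN heq
      by_cases hjN' : j = N
      · subst hjN'
        exact hcNS (heq ▸ hmemc i (by omega))
      · have hdet : pvChain d num (N - j + i) = pvChain d num N := by
          have h1 : pvChain d num (N - j + i) = (pvStep d)^[N - j] (pvChain d num i) :=
            pvChain_add d num (N - j) i
          have h2 : pvChain d num (N - j + j) = (pvStep d)^[N - j] (pvChain d num j) :=
            pvChain_add d num (N - j) j
          rw [h1, heq, ← h2, show N - j + j = N by omega]
        have hnn : d.get? (pvChain d num (N - j + i)) = none := by rw [hdet]; exact hNnone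
        exact hNmin (N - j + i) (by omega) hnn
    have hNle : N ≤ S.length := by
      have hsub : ((List.range N).map (pvChain d num)) ⊆ S := by
        intro y hy
        simp only [List.mem_map, List.mem_range] at hy
        obtain ⟨i, hi, rfl⟩ := hy
        exact hmemc i hi
      have hnd : ((List.range N).map (pvChain d num)).Nodup := by
        refine List.Nodup.map_on ?_ List.nodup_range
        intro a ha b hb hab
        simp only [List.mem_range] at ha hb
        by_contra hne
        rcases Nat.lt_or_ge a b with h | h
        · exact hinj a b h (by omega) hab
        · exact hinj b a (by omega) (by omega) hab.symm
      have := (hnd.subperm hsub).length_le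
      simpa using this
    have hsizeS : d.size = S.length := by
      have hperm : d.keys.Perm S :=
        (List.perm_ext_iff_of_nodup hKn hS).mpr
          (fun y => by rw [pv_mem_keys_iff, hK])
      rw [show d.size = d.keys.length by simp [PySem.Dict.size, PySem.Dict.keys]]
      exact hperm.length_eq
    have hc1 : pvChain d num 1 = v0 := by
      rw [pvChain_succ]
      simp [pvStep, show d.get? (pvChain d num 0) = some v0 from hv]
    obtain ⟨hw2, hwc, hwe⟩ :=
      pv_whileA_sim d (pvChain d num) N hsome hNnone hinj (N - 1) 1 d (d.size + 1)
        (by omega) (fun j _ _ => rfl) (by omega)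
    rw [show pvChain d num 0 = num from rfl, hc1] at hw2 hwc hwe
    set W := solWhileA d num v0 (d.size + 1) with hWdef
    have hW2 : W.2 = pvFF S num := by rw [hw2, hcNF]
    have hstepA : solStepA d num
        = ((W.1.insert (pvFF S num) num).insert num (pvFF S num + 1), pvFF S num) := by
      simp only [solStepA, hv, ← hWdef, hW2]
    set F := pvFF S num with hFdef
    set d2 := (W.1.insert F num).insert num (F + 1) with hd2def
    have hd2num : d2.get? num = some (F + 1) := by
      rw [hd2def, PySem.Dict.get?_insert_self]
    have hd2F : d2.get? F = some num := by
      rw [hd2def, PySem.Dict.get?_insert, if_neg hFnum, PySem.Dict.get?_insert_self]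
    have hd2c : ∀ j, 1 ≤ j → j < N → d2.get? (pvChain d num j) = some num := by
      intro j h1 h2
      have hcjnum : pvChain d num j ≠ num := (hinj 0 j (by omega) (by omega)).symm
      have hcjF : pvChain d num j ≠ F := by
        rw [← hcNF]; exact hinj j N h2 le_rfl
      rw [hd2def, PySem.Dict.get?_insert, if_neg hcjnum,
        PySem.Dict.get?_insert, if_neg hcjF]
      exact hwc j h1 h2
    have hd2e : ∀ y, y ≠ num → y ≠ F →
        (∀ j, 1 ≤ j → j < N → y ≠ pvChain d num j) → d2.get? y = d.get? y := by
      intro y h1 h2 h3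
      rw [hd2def, PySem.Dict.get?_insert, if_neg h1,
        PySem.Dict.get?_insert, if_neg h2]
      exact hwe y h3
    have hchg : ∀ z, d2.get? z ≠ d.get? z → pvFF S z = F := by
      intro z hz
      by_cases hz1 : z = num
      · rw [hz1]
      · by_cases hz2 : z = F
        · rw [hz2]; exact pvFF_of_not_mem S F hFS
        · by_cases hz3 : ∃ j, 1 ≤ j ∧ j < N ∧ z = pvChain d num j
          · obtain ⟨j, hj1, hj2, rfl⟩ := hz3
            exact hffc j
          · push_neg at hz3
            exact absurd (hd2e z hz1 hz2 (fun j hj1 hj2 => hz3 j hj1 hj2)) hz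
    have hG : F + 1 ≤ pvFF S (F + 1) := pvFF_le S (F + 1)
    rw [hstepA]
    refine ⟨rfl, ⟨?_, ?_, ?_⟩, PySem.Set.nodup_add S _ hS, ?_⟩
    · intro y
      by_cases hy1 : y = num
      · rw [hy1, hd2num]
        simp only [Option.isSome_some, true_iff]
        exact (hmem' num).mpr (Or.inl hnumS)
      · by_cases hy2 : y = F
        · rw [hy2, hd2F]
          simp only [Option.isSome_some, true_iff]
          exact (hmem' F).mpr (Or.inr rfl)
        · by_cases hy3 : ∃ j, 1 ≤ j ∧ j < N ∧ y = pvChain d num j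
          · obtain ⟨j, hj1, hj2, rfl⟩ := hy3
            rw [hd2c j hj1 hj2]
            simp only [Option.isSome_some, true_iff]
            exact (hmem' _).mpr (Or.inl (hmemc j hj2))
          · push_neg at hy3
            rw [hd2e y hy1 hy2 hy3, hK y]
            constructor
            · intro hy; exact (hmem' y).mpr (Or.inl hy)
            · intro hy
              rcases (hmem' y).mp hy with hy' | hy'
              · exact hy'
              · exact absurd hy' hy2
    · intro x w hx
      by_cases hx1 : x = num
      · rw [hx1] at hx ⊢
        rw [hd2num] at hx
        obtain rfl : w = F + 1 := by injection hx with h'; omega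
        rw [ffadd, ffadd, if_neg (by omega), if_pos hFdef.symm]
      · by_cases hx2 : x = F
        · rw [hx2] at hx ⊢
          rw [hd2F] at hx
          obtain rfl : w = num := by injection hx with h'; omega
          rw [ffadd, ffadd, if_pos hFdef.symm,
            if_pos (pvFF_of_not_mem S F hFS)]
        · by_cases hx3 : ∃ j, 1 ≤ j ∧ j < N ∧ x = pvChain d num j
          · obtain ⟨j, hj1, hj2, rfl⟩ := hx3
            rw [hd2c j hj1 hj2] at hx
            obtain rfl : w = num := by injection hx with h'; omega
            rw [ffadd, ffadd, if_pos hFdef.symm, if_pos (hffc j)]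
          · push_neg at hx3
            rw [hd2e x hx1 hx2 hx3] at hx
            rw [ffadd, ffadd, hE x w hx]
    · refine pv_term_preserve d d2 S F hE hchg hT ?_
      intro z hz
      by_cases hz1 : z = num
      · rw [hz1]
        refine ⟨1, F + 1, ?_, by omega⟩
        show pvStep d2 num = F + 1
        simp [pvStep, hd2num]
      · by_cases hz2 : z = F
        · rw [hz2]
          refine ⟨2, F + 1, ?_, by omega⟩
          show pvStep d2 (pvStep d2 F) = F + 1
          rw [show pvStep d2 F = num by simp [pvStep, hd2F]]
          simp [pvStep, hd2num]
        · by_cases hz3 : ∃ j, 1 ≤ j ∧ j < N ∧ z = pvChain d num j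
          · obtain ⟨j, hj1, hj2, rfl⟩ := hz3
            refine ⟨2, F + 1, ?_, by omega⟩
            show pvStep d2 (pvStep d2 (pvChain d num j)) = F + 1
            rw [show pvStep d2 (pvChain d num j) = num by simp [pvStep, hd2c j hj1 hj2]]
            simp [pvStep, hd2num]
          · push_neg at hz3
            exact absurd (hd2e z hz1 hz2 hz3) hz
    · rw [hd2def]
      refine PySem.Dict.nodup_keys_insert _ _ _ (PySem.Dict.nodup_keys_insert _ _ _ ?_)
      exact pv_whileA_keys (d.size + 1) d num v0 hKn

lemma pv_inv_empty : pvInv (PySem.Dict.empty : PySem.Dict Int Int) [] := by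
  refine ⟨?_, ?_, ?_⟩
  · intro x; simp [PySem.Dict.get?_empty]
  · intro x v h; simp [PySem.Dict.get?_empty] at h
  · intro x; exact ⟨0, by simp [PySem.Dict.get?_empty]⟩

lemma pv_loop (l : List Int) : ∀ (d : PySem.Dict Int Int) (S : PySem.Set Int) (acc : List Int),
    pvInv d S → S.Nodup → d.keys.Nodup →
    (l.foldl (fun st num => let r := solStepA st.1 num; (r.1, st.2 ++ [r.2])) (d, acc)).2
    = (l.foldl (fun st num =>
        let r := solProbe st.1 num (st.1.length + 1)
        (PySem.Set.add st.1 r, st.2 ++ [r])) (S, acc)).2 := by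
  induction l with
  | nil => intro d S acc _ _ _; rfl
  | cons num l ih =>
    intro d S acc hInv hS hKn
    obtain ⟨ha, hinv2, hS2, hK2⟩ := pv_stepA_spec d S num hInv hS hKn
    have hprobe : solProbe S num (S.length + 1) = pvFF S num :=
      solProbe_eq S num (S.length + 1) (by have := pvFF_sub_le S hS num; omega)
    simp only [List.foldl_cons, ha, hprobe]
    exact ih (solStepA d num).1 (PySem.Set.add S (pvFF S num)) (acc ++ [pvFF S num]) hinv2 hS2 hK2

-- ===== VERDICT (by name: the statement is the Claim_ definition above) =====
theorem solution_spec : Claim_equal_solution := by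
  intro k room_number _
  unfold Spec_solution solution solution_alt
  exact pv_loop room_number _ _ [] pv_inv_empty (by simp) (by simp [PySem.Dict.nodup_keys_empty])
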